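-- pv_equiv track=rewrite | github.com/weesunghyun/OOD-DFQ | data_generate/generate_data.py | compute_even_class_targets
-- ===== SOURCE A (Python) =====
-- from typing import Any, Callable, Dict, Iterator, List, Optional, Set, Tuple
--
-- def compute_even_class_targets(total: int, num_classes: int) -> Dict[int, int]:
--     if num_classes <= 0:
--         raise ValueError('Number of classes must be positive to distribute targets evenly.')
--
--     base = total // num_classes
--     remainder = total % num_classes
--
--     targets = {label: base for label in range(num_classes)}
--
--     for label in range(remainder):
--         targets[label] += 1
--
--     return targets
-- ===== SOURCE B (Python) =====
-- def compute_even_class_targets(total: int, num_classes: int):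
--     if num_classes <= 0:
--         raise ValueError('Number of classes must be positive to distribute targets evenly.')
--     targets = {}
--     remaining = total
--     for label in range(num_classes):
--         share = -((-remaining) // (num_classes - label))  # ceil(remaining / classes left)
--         targets[label] = share
--         remaining -= share
--     return targets
-- ===== Notes on version B (the rewrite author's own statement) =====
-- stated objective: alternative
-- what changed: Replaces A's two-pass build-then-patch (fill every class with total//num_classes, then increment the first total%num_classes keys) with a single-pass greedy algorithm that keeps a running 'remaining' accumulator and gives each class the ceiling of remaining divided by the classes still unserved; no base/remainder pair is ever computed.
import Mathlib
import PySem

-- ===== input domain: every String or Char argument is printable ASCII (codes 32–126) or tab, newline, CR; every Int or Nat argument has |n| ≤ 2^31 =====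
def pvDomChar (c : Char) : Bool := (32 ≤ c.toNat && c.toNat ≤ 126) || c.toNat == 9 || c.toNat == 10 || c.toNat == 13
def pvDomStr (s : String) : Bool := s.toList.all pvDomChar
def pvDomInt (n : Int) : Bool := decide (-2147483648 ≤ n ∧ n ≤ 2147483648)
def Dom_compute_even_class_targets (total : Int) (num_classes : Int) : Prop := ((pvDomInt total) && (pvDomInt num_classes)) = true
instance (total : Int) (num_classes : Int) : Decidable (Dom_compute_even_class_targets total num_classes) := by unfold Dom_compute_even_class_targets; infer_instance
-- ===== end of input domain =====

-- B replaces A's two-pass build-then-patch with a one-pass greedy loop: each class gets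
-- ceil(remaining / classes_left) and the remaining total is decremented (alternative algorithm, same cost).


-- ===== PORT A =====
-- A: fill every label in range(num_classes) with base, then a second loop adds 1 to the
-- first `remainder` labels; returns the dict (as its items list).  num_classes ≤ 0 raises
-- (excluded by Pre_); the `if` branch only makes the port total.
def compute_even_class_targets (total : Int) (num_classes : Int) : List (Int × Int) :=
  if num_classes ≤ 0 then []
  else
    let base := PySem.Int.floordiv total num_classes
    let remainder := PySem.Int.mod total num_classes
    let targets : PySem.Dict Int Int :=
      (PySem.List.pyRange 0 num_classes 1).foldl (fun d label => d.insert label base) PySem.Dict.empty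
    ((PySem.List.pyRange 0 remainder 1).foldl (fun d label => d.modify label 0 (· + 1)) targets).items

-- ===== PORT B =====
-- B: one pass; each label gets share = -((-remaining) // classes_left) (= ceil) and
-- remaining shrinks by the share.
def compute_even_class_targets_alt (total : Int) (num_classes : Int) : List (Int × Int) :=
  if num_classes ≤ 0 then []
  else
    let st :=
      (PySem.List.pyRange 0 num_classes 1).foldl
        (fun (st : PySem.Dict Int Int × Int) label =>
          let share := -(PySem.Int.floordiv (-(st.2)) (num_classes - label))
          (st.1.insert label share, st.2 - share))
        (PySem.Dict.empty, total)
    st.1.items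

-- ===== PRECONDITION & SPEC =====
-- A raises ValueError when num_classes ≤ 0; Pre_ excludes exactly those inputs.
def Pre_compute_even_class_targets (total : Int) (num_classes : Int) : Prop := 0 < num_classes
instance (total : Int) (num_classes : Int) : Decidable (Pre_compute_even_class_targets total num_classes) := by unfold Pre_compute_even_class_targets; infer_instance

def pvWitness_compute_even_class_targets : Int × Int := (7, 3)

def Spec_compute_even_class_targets (total : Int) (num_classes : Int) (out : List (Int × Int)) : Prop := out = compute_even_class_targets_alt total num_classes
instance (total : Int) (num_classes : Int) (out : List (Int × Int)) : Decidable (Spec_compute_even_class_targets total num_classes out) := by unfold Spec_compute_even_class_targets; infer_instance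

-- ===== CLAIM (what is proved, stated in full; the proofs are below) =====
def Claim_equal_compute_even_class_targets : Prop := ∀ (total : Int) (num_classes : Int), Dom_compute_even_class_targets total num_classes → Pre_compute_even_class_targets total num_classes → Spec_compute_even_class_targets total num_classes (compute_even_class_targets total num_classes)

-- ===== LEMMAS AND PROOFS =====

-- The canonical outcome both algorithms reach: label l ↦ base + (1 if l < r else 0).
def pvEvenVal (base r l : Int) : Int := base + if l < r then 1 else 0

-- ---- A-side lemmas ----

-- The insert loop over fresh, pairwise-distinct keys just appends the pairs in order.
theorem foldl_insert_items (base : Int) :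
    ∀ (l : List Int) (d : PySem.Dict Int Int), l.Nodup → (∀ x ∈ l, d.contains x = false) →
      (l.foldl (fun d x => d.insert x base) d).items = d.items ++ l.map (fun x => (x, base)) := by
  intro l
  induction l with
  | nil => intro d _ _; simp
  | cons x xs ih =>
    intro d hnd hfresh
    have hx : d.contains x = false := hfresh x (by simp)
    have hins : (d.insert x base).items = d.items ++ [(x, base)] :=
      PySem.Dict.items_insert_of_not_contains d base hx
    have hfresh' : ∀ y ∈ xs, (d.insert x base).contains y = false := by
      intro y hy
      have hyx : y ≠ x := fun h => (List.nodup_cons.mp hnd).1 (h ▸ hy)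
      have hyd : d.contains y = false := hfresh y (List.mem_cons_of_mem _ hy)
      simp [PySem.Dict.contains, hins] at *
      refine ⟨?_, fun h => hyx h.symm⟩
      intro a b hab
      exact hyd a b hab
    simp only [List.foldl_cons]
    rw [ih (d.insert x base) (List.nodup_cons.mp hnd).2 hfresh', hins]
    simp

theorem find?_pyRange (m n : Int) :
    ∀ (k : Nat) (a : Int), n - a ≤ (k : Int) → a ≤ m → m < n →
      List.find? (fun l => l == m) (PySem.List.pyRange a n 1) = some m := by
  intro k
  induction k with
  | zero => intro a hk ham hmn; omega
  | succ k ih =>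
    intro a hk ham hmn
    rw [PySem.List.pyRange_one_cons (by omega)]
    by_cases hax : a = m
    · simp [hax]
    · have hbeq : (a == m) = false := by simpa using hax
      simp only [List.find?_cons, hbeq]
      exact ih (a + 1) (by omega) (by omega) hmn

theorem find?_map_pyRange (f : Int → Int × Int) (hf : ∀ l, (f l).1 = l)
    (n m : Int) (h0 : 0 ≤ m) (h : m < n) :
    List.find? (fun p => p.1 == m) ((PySem.List.pyRange 0 n 1).map f) = some (f m) := by
  rw [List.find?_map]
  have : ((fun p : Int × Int => p.1 == m) ∘ f) = (fun l : Int => l == m) := by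
    funext l; simp [hf l]
  rw [this, find?_pyRange m n n.toNat 0 (by omega) h0 h]
  rfl

-- The modify loop, run over range(0, j), turns the constant-base dict into the
-- "base + indicator" dict.
theorem foldl_modify_items (base : Int) (n : Int) :
    ∀ (j : Nat), (j : Int) ≤ n →
      (PySem.List.pyRange 0 (j : Int) 1).foldl (fun d label => d.modify label 0 (· + 1))
          (PySem.Dict.mk ((PySem.List.pyRange 0 n 1).map (fun l => (l, base))))
        = PySem.Dict.mk ((PySem.List.pyRange 0 n 1).map
            (fun l => (l, base + if l < (j : Int) then 1 else 0))) := by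
  intro j
  induction j with
  | zero =>
    intro _
    simp [PySem.List.pyRange_one_eq_nil (le_refl (0 : Int))]
    exact fun a h _ => h
  | succ j ih =>
    intro hj
    have hjn : (j : Int) < n := by push_cast at hj ⊢; omega
    have hsplit : PySem.List.pyRange 0 ((j : Nat) + 1 : Int) 1
        = PySem.List.pyRange 0 (j : Int) 1 ++ [(j : Int)] := by
      have := PySem.List.pyRange_one_succ_right (a := 0) (b := (j : Int)) (by positivity)
      exact this
    rw [show (((j : Nat) + 1 : Nat) : Int) = ((j : Nat) + 1 : Int) by push_cast; ring, hsplit,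
      List.foldl_append, ih (by omega)]
    simp only [List.foldl_cons, List.foldl_nil]
    have hget : (PySem.Dict.mk ((PySem.List.pyRange 0 n 1).map
        (fun l => (l, base + if l < (j : Int) then 1 else 0)))).getD (j : Int) 0 = base := by
      have hfind := find?_map_pyRange (fun l => (l, base + if l < (j : Int) then 1 else 0))
        (by intro l; rfl) n (j : Int) (by positivity) hjn
      simp [PySem.Dict.getD, PySem.Dict.get?, hfind]
    have hcont : (PySem.Dict.mk ((PySem.List.pyRange 0 n 1).map
        (fun l => (l, base + if l < (j : Int) then 1 else 0)))).contains (j : Int) = true := by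
      simp only [PySem.Dict.contains, List.any_eq_true]
      refine ⟨((j : Int), base + if (j : Int) < (j : Int) then 1 else 0), ?_, by simp⟩
      exact List.mem_map_of_mem (PySem.List.mem_pyRange_one.mpr ⟨by positivity, hjn⟩)
    rw [PySem.Dict.modify, hget, PySem.Dict.insert, if_pos hcont]
    congr 1
    rw [List.map_map]
    apply List.map_congr_left
    intro l hl
    have hlb := PySem.List.mem_pyRange_one.mp hl
    by_cases hlj : l = (j : Int)
    · simp [hlj, Function.comp]
    · simp only [Function.comp]
      simp [hlj]
      split_ifs <;> omega

-- A's items are the canonical list.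
theorem portA_items (total n : Int) (hn : 0 < n) :
    compute_even_class_targets total n
      = (PySem.List.pyRange 0 n 1).map
          (fun l => (l, pvEvenVal (PySem.Int.floordiv total n) (PySem.Int.mod total n) l)) := by
  unfold compute_even_class_targets
  rw [if_neg (not_le.mpr hn)]
  set base := PySem.Int.floordiv total n with hbase
  set r := PySem.Int.mod total n with hr
  have hr0 : 0 ≤ r := PySem.Int.mod_nonneg total hn
  have hrn : r ≤ n := le_of_lt (PySem.Int.mod_lt total hn)
  have htargets :
      (PySem.List.pyRange 0 n 1).foldl (fun d label => d.insert label base) PySem.Dict.empty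
        = PySem.Dict.mk ((PySem.List.pyRange 0 n 1).map (fun l => (l, base))) := by
    apply PySem.Dict.ext
    rw [foldl_insert_items base (PySem.List.pyRange 0 n 1) PySem.Dict.empty
      (PySem.List.nodup_pyRange_one 0 n) (by intro x _; rfl)]
    rfl
  simp only [htargets]
  rw [show r = ((r.toNat : Nat) : Int) by omega, foldl_modify_items base n r.toNat (by omega)]
  simp [pvEvenVal]

-- ---- B-side lemmas ----

-- One greedy step: with remaining = (n-j)*base + max (r-j) 0 and j < n, the ceiling share
-- is exactly base + (1 if j < r else 0).
theorem greedy_share (base r n j : Int) (hj0 : 0 ≤ j) (hjn : j < n) (hr0 : 0 ≤ r) (hrn : r < n) :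
    -(PySem.Int.floordiv (-((n - j) * base + max (r - j) 0)) (n - j)) = pvEvenVal base r j := by
  rw [PySem.Int.neg_floordiv_neg_eq_iff_of_pos (show (0:Int) < n - j by omega)]
  unfold pvEvenVal
  by_cases hjr : j < r
  · rw [if_pos hjr, max_eq_left (by omega)]
    constructor <;> nlinarith
  · rw [if_neg hjr, max_eq_right (by omega)]
    constructor <;> nlinarith

-- The B-fold invariant: after the first j steps the dict is the canonical prefix and the
-- remaining amount is (n-j)*base + max (r-j) 0, where total = base*n + r, 0 ≤ r < n.
theorem greedy_foldl (total n : Int) (hn : 0 < n) :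
    ∀ (j : Nat), (j : Int) ≤ n →
      (PySem.List.pyRange 0 (j : Int) 1).foldl
        (fun (st : PySem.Dict Int Int × Int) label =>
          let share := -(PySem.Int.floordiv (-(st.2)) (n - label))
          (st.1.insert label share, st.2 - share))
        (PySem.Dict.empty, total)
      = (PySem.Dict.mk ((PySem.List.pyRange 0 (j : Int) 1).map
            (fun l => (l, pvEvenVal (PySem.Int.floordiv total n) (PySem.Int.mod total n) l))),
         (n - j) * PySem.Int.floordiv total n + max (PySem.Int.mod total n - j) 0) := by
  set base := PySem.Int.floordiv total n with hbase
  set r := PySem.Int.mod total n with hr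
  have hr0 : 0 ≤ r := PySem.Int.mod_nonneg total hn
  have hrn : r < n := PySem.Int.mod_lt total hn
  have htot : base * n + r = total := PySem.Int.floordiv_mul_add_mod total n
  intro j
  induction j with
  | zero =>
    intro _
    simp only [Int.natCast_zero]
    rw [PySem.List.pyRange_one_eq_nil (le_refl (0 : Int))]
    simp only [List.foldl_nil, List.map_nil, sub_zero]
    rw [Prod.ext_iff]
    refine ⟨rfl, ?_⟩
    simp only []
    rw [max_eq_left hr0]; linarith
  | succ j ih =>
    intro hj
    have hjn : (j : Int) < n := by push_cast at hj ⊢; omega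
    have hsplit : PySem.List.pyRange 0 ((j : Nat) + 1 : Int) 1
        = PySem.List.pyRange 0 (j : Int) 1 ++ [(j : Int)] :=
      PySem.List.pyRange_one_succ_right (a := 0) (b := (j : Int)) (by positivity)
    rw [show (((j : Nat) + 1 : Nat) : Int) = ((j : Nat) + 1 : Int) by push_cast; ring, hsplit,
      List.foldl_append, ih (by omega)]
    simp only [List.foldl_cons, List.foldl_nil, List.map_append, List.map_cons, List.map_nil]
    have hshare := greedy_share base r n (j : Int) (by positivity) hjn hr0 hrn
    rw [Prod.ext_iff]
    constructor
    · -- dict part: the new key j is fresh, so insert appends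
      rw [hshare]
      have hfresh : (PySem.Dict.mk ((PySem.List.pyRange 0 (j : Int) 1).map
          (fun l => (l, pvEvenVal base r l)))).contains (j : Int) = false := by
        rw [Bool.eq_false_iff]
        intro hcont
        obtain ⟨p, hp, hbeq⟩ := List.any_eq_true.mp hcont
        obtain ⟨l, hl, rfl⟩ := List.mem_map.mp hp
        have h1 := PySem.List.mem_pyRange_one.mp hl
        have h2 : l = (j : Int) := by simpa using hbeq
        omega
      apply PySem.Dict.ext
      rw [PySem.Dict.items_insert_of_not_contains _ _ hfresh]
    · -- remaining part
      rw [hshare]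
      unfold pvEvenVal
      by_cases hjr : (j : Int) < r
      · rw [if_pos hjr, max_eq_left (by omega), max_eq_left (by omega)]; ring
      · rw [if_neg hjr, max_eq_right (by omega), max_eq_right (by omega)]; ring

-- B's items are the canonical list too.
theorem portB_items (total n : Int) (hn : 0 < n) :
    compute_even_class_targets_alt total n
      = (PySem.List.pyRange 0 n 1).map
          (fun l => (l, pvEvenVal (PySem.Int.floordiv total n) (PySem.Int.mod total n) l)) := by
  unfold compute_even_class_targets_alt
  rw [if_neg (not_le.mpr hn)]
  have := greedy_foldl total n hn n.toNat (by omega)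
  rw [show ((n.toNat : Nat) : Int) = n by omega] at this
  simp only [this]

-- ===== VERDICT (by name: the statement is the Claim_ definition above) =====
theorem compute_even_class_targets_spec : Claim_equal_compute_even_class_targets := by
  intro total n _ hpre
  unfold Spec_compute_even_class_targets
  rw [portA_items total n hpre, portB_items total n hpre]
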